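-- pv_equiv track=rewrite | github.com/MrBrantCode/unitest_baseline | mut_generate/mist_train_taco/taco_4691/solution.py | min_scale_uses
-- ===== SOURCE A (Python) =====
-- def min_scale_uses(N: int) -> int:
--     if N == 1:
--         return 0
--     if N == 2 or N == 3:
--         return 1
--
--     count = 0
--     prod = 1
--
--     while prod < N:
--         count += 1
--         prod *= 3
--
--     return count
-- ===== SOURCE B (Python) =====
-- def min_scale_uses(N: int) -> int:
--     if N <= 1:
--         return 0
--     return 1 + min_scale_uses((N + 2) // 3)
-- ===== Notes on version B (the rewrite author's own statement) =====
-- stated objective: simpler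
-- what changed: Replaces the upward-counting loop (growing product of 3s compared to N) with a recursion that shrinks N by ceiling division by 3 until it reaches 1, dropping the special-case guards for N==1,2,3.
import Mathlib
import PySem

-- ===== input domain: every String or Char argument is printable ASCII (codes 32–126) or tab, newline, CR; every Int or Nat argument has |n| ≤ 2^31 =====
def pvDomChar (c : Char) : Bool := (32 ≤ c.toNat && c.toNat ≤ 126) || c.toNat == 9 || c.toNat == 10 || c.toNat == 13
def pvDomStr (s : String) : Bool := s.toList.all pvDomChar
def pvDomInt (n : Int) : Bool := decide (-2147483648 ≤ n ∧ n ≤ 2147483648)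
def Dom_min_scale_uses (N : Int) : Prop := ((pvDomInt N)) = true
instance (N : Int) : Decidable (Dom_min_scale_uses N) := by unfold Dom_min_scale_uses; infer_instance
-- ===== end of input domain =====

-- B replaces A's upward-counting product loop by a recursion that shrinks N via ceiling
-- division by 3 until it reaches 1 (simpler: no special cases, no growing product).

-- ===== PORT A =====
-- A's while loop: prod is always 3^count, so the loop state (count, prod) is carried
-- as the exponent k with prod = 3^k; each iteration does count += 1, prod *= 3 (k+1).
def pvALoop (N : Int) (k : Nat) : Int :=
  if (3:Int)^k < N then pvALoop N (k+1) else (k : Int)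
termination_by (N - (3:Int)^k).toNat
decreasing_by
  have h1 : (0:Int) < 3^k := pow_pos (by norm_num) k
  rw [pow_succ]
  omega

def min_scale_uses (N : Int) : Int :=
  if N = 1 then 0
  else if N = 2 ∨ N = 3 then 1
  else pvALoop N 0

-- ===== PORT B =====
def min_scale_uses_alt (N : Int) : Int :=
  if N ≤ 1 then 0
  else 1 + min_scale_uses_alt (PySem.Int.floordiv (N + 2) 3)
termination_by N.toNat
decreasing_by
  rw [PySem.Int.floordiv_eq_ediv_of_pos (by omega)]
  omega

-- ===== PRECONDITION & SPEC =====
def Spec_min_scale_uses (N : Int) (out : Int) : Prop := out = min_scale_uses_alt N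
instance (N : Int) (out : Int) : Decidable (Spec_min_scale_uses N out) := by unfold Spec_min_scale_uses; infer_instance

-- ===== CLAIM (what is proved, stated in full; the proofs are below) =====
def Claim_equal_min_scale_uses : Prop := ∀ (N : Int), Dom_min_scale_uses N → Spec_min_scale_uses N (min_scale_uses N)

-- ===== LEMMAS AND PROOFS =====

-- Shifting A's loop one step corresponds to one ceiling division by 3 of N.
theorem pvALoop_shift (n : Int) (_hn : 2 ≤ n) :
    ∀ k, pvALoop n (k+1) = 1 + pvALoop (PySem.Int.floordiv (n + 2) 3) k := by
  set c : Int := PySem.Int.floordiv (n + 2) 3 with hc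
  have hcdiv : c = (n + 2) / 3 := by
    rw [hc, PySem.Int.floordiv_eq_ediv_of_pos (by omega)]
  intro k
  induction hk : (c - (3:Int)^k).toNat using Nat.strong_induction_on generalizing k with
  | _ m ih =>
    have hkey : ((3:Int)^(k+1) < n) ↔ ((3:Int)^k < c) := by
      have h2 : (3:Int)^(k+1) = 3^k * 3 := pow_succ 3 k
      constructor <;> intro h <;> omega
    by_cases h : (3:Int)^k < c
    · conv_lhs => rw [pvALoop]
      conv_rhs => rw [pvALoop]
      rw [if_pos (hkey.mpr h), if_pos h]
      subst hk
      apply ih _ _ _ rfl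
      have h2 : (3:Int)^(k+1) = 3^k * 3 := pow_succ 3 k
      have h1 : (0:Int) < 3^k := pow_pos (by norm_num) k
      omega
    · conv_lhs => rw [pvALoop]
      conv_rhs => rw [pvALoop]
      rw [if_neg (fun hx => h (hkey.mp hx)), if_neg h]
      push_cast
      ring

-- The two algorithms agree for every N.
theorem pvLoop_eq_alt : ∀ n : Int, pvALoop n 0 = min_scale_uses_alt n := by
  intro n
  induction hk : n.toNat using Nat.strong_induction_on generalizing n with
  | _ m ih =>
    by_cases h1 : n ≤ 1
    · rw [pvALoop, min_scale_uses_alt, if_pos h1, if_neg (by norm_num; omega)]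
      norm_num
    · rw [not_le] at h1
      set c : Int := PySem.Int.floordiv (n + 2) 3 with hc
      have hcdiv : c = (n + 2) / 3 := by
        rw [hc, PySem.Int.floordiv_eq_ediv_of_pos (by omega)]
      rw [min_scale_uses_alt, if_neg (by omega)]
      rw [pvALoop, if_pos (by norm_num; omega)]
      rw [pvALoop_shift n (by omega) 0]
      subst hk
      rw [ih c.toNat (by omega) c rfl]

-- ===== VERDICT (by name: the statement is the Claim_ definition above) =====
theorem min_scale_uses_spec : Claim_equal_min_scale_uses := by
  intro N _
  unfold Spec_min_scale_uses min_scale_uses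
  by_cases h1 : N = 1
  · subst h1
    rw [if_pos rfl, min_scale_uses_alt]
    norm_num
  · rw [if_neg h1]
    by_cases h2 : N = 2 ∨ N = 3
    · rw [if_pos h2]
      rcases h2 with h | h <;> subst h <;>
        · rw [min_scale_uses_alt, if_neg (by norm_num)]
          have hc : PySem.Int.floordiv (2 + 2) 3 = 1 ∧ PySem.Int.floordiv (3 + 2) 3 = 1 := by decide
          first
          | rw [hc.1, min_scale_uses_alt]; norm_num
          | rw [hc.2, min_scale_uses_alt]; norm_num
    · rw [if_neg h2]
      exact pvLoop_eq_alt N
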